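-- pv_equiv track=rewrite | github.com/LeoGoat2004/ccmas-python-cli | src/ccmas/query/compact.py | group_messages_by_api_round
-- ===== SOURCE A (Python) =====
-- from typing import Any, Callable, Dict, List, Literal, Optional, Union
--
-- def group_messages_by_api_round(messages: List[Dict[str, Any]]) -> List[List[Dict[str, Any]]]:
--     """
--     Group messages by API round for PTL retry logic.
--
--     Args:
--         messages: List of messages
--
--     Returns:
--         List of message groups
--     """
--     if not messages:
--         return []
--
--     groups: List[List[Dict[str, Any]]] = []
--     current_group: List[Dict[str, Any]] = []
--
--     for msg in messages:
--         if msg.get("type") == "user" and not current_group: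
--             current_group.append(msg)
--         elif msg.get("type") == "assistant":
--             current_group.append(msg)
--         elif msg.get("type") == "tool":
--             current_group.append(msg)
--         else:
--             if current_group:
--                 groups.append(current_group)
--             current_group = [msg] if msg.get("type") == "user" else []
--
--     if current_group:
--         groups.append(current_group)
--
--     return groups
-- ===== SOURCE B (Python) =====
-- from typing import Any, Dict, List
--
--
-- def group_messages_by_api_round(messages: List[Dict[str, Any]]) -> List[List[Dict[str, Any]]]:
--     """Two-pass variant: first split the stream into segments at messages of
--     unknown type (dropping those delimiters), then split each segment into
--     groups where every 'user' message opens a new group."""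
--     # Pass 1: maximal runs of known-type messages, separated by unknown types.
--     segments: List[List[Dict[str, Any]]] = []
--     seg: List[Dict[str, Any]] = []
--     for m in messages:
--         if m.get("type") in ("user", "assistant", "tool"):
--             seg.append(m)
--         else:
--             segments.append(seg)
--             seg = []
--     segments.append(seg)
--
--     # Pass 2: within each segment, a 'user' message starts a new group;
--     # assistant/tool messages (and a leading run of them) join the current one.
--     out: List[List[Dict[str, Any]]] = []
--     for seg in segments:
--         cur: List[Dict[str, Any]] = []
--         for m in seg:
--             if m.get("type") == "user" and cur:
--                 out.append(cur)
--                 cur = [m]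
--             else:
--                 cur.append(m)
--         if cur:
--             out.append(cur)
--     return out
-- ===== Notes on version B (the rewrite author's own statement) =====
-- stated objective: alternative
-- what changed: A's single flat loop with four interacting branches is replaced by two separate passes: first split the message stream into segments at unknown-type messages (dropping the delimiters), then split each segment into groups opened at each 'user' message.
import Mathlib
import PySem

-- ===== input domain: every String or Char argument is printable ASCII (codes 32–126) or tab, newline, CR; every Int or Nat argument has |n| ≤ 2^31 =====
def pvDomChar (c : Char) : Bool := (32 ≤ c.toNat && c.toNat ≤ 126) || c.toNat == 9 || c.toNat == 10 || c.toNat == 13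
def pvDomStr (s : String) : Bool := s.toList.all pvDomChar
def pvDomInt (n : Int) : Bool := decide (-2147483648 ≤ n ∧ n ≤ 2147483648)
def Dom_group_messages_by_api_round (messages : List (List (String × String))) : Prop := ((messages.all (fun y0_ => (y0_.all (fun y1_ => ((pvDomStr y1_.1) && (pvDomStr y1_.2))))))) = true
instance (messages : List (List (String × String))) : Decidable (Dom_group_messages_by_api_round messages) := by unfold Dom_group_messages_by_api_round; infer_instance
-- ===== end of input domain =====

-- B replaces A's single branching loop by two passes: split at unknown-type messages, then group each segment at 'user' boundaries (objective: alternative decomposition, same cost).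

-- msg.get("type") on the association-list message (first match, none if absent)
def getType (msg : List (String × String)) : Option String :=
  (PySem.Dict.mk msg).get? "type"

-- ===== PORT A =====
def aStep (st : List (List (List (String × String))) × List (List (String × String)))
    (msg : List (String × String)) :
    List (List (List (String × String))) × List (List (String × String)) :=
  if getType msg = some "user" ∧ st.2 = [] then (st.1, st.2 ++ [msg])
  else if getType msg = some "assistant" then (st.1, st.2 ++ [msg])
  else if getType msg = some "tool" then (st.1, st.2 ++ [msg])
  else ((if st.2 ≠ [] then st.1 ++ [st.2] else st.1),
        if getType msg = some "user" then [msg] else [])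

def group_messages_by_api_round (messages : List (List (String × String))) : List (List (List (String × String))) :=
  if messages = [] then []
  else
    let r := messages.foldl aStep ([], [])
    if r.2 ≠ [] then r.1 ++ [r.2] else r.1

-- ===== PORT B =====
-- pass 1 step: known types extend the current segment, unknown types close it (dropping the message)
def bSegStep (st : List (List (List (String × String))) × List (List (String × String)))
    (m : List (String × String)) :
    List (List (List (String × String))) × List (List (String × String)) :=
  if getType m = some "user" ∨ getType m = some "assistant" ∨ getType m = some "tool"
  then (st.1, st.2 ++ [m]) else (st.1 ++ [st.2], [])

-- pass 2 step: a 'user' message with a non-empty current group starts a new group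
def bGroupStep (st : List (List (List (String × String))) × List (List (String × String)))
    (m : List (String × String)) :
    List (List (List (String × String))) × List (List (String × String)) :=
  if getType m = some "user" ∧ st.2 ≠ [] then (st.1 ++ [st.2], [m]) else (st.1, st.2 ++ [m])

def bGroupSeg (out : List (List (List (String × String)))) (seg : List (List (String × String))) :
    List (List (List (String × String))) :=
  let r := seg.foldl bGroupStep (out, [])
  if r.2 ≠ [] then r.1 ++ [r.2] else r.1

def group_messages_by_api_round_alt (messages : List (List (String × String))) : List (List (List (String × String))) :=
  let s := messages.foldl bSegStep ([], [])
  (s.1 ++ [s.2]).foldl bGroupSeg []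

-- ===== PRECONDITION & SPEC =====
def Spec_group_messages_by_api_round (messages : List (List (String × String))) (out : List (List (List (String × String)))) : Prop := out = group_messages_by_api_round_alt messages
instance (messages : List (List (String × String))) (out : List (List (List (String × String)))) : Decidable (Spec_group_messages_by_api_round messages out) := by unfold Spec_group_messages_by_api_round; infer_instance

-- ===== CLAIM (what is proved, stated in full; the proofs are below) =====
def Claim_equal_group_messages_by_api_round : Prop := ∀ (messages : List (List (String × String))), Dom_group_messages_by_api_round messages → Spec_group_messages_by_api_round messages (group_messages_by_api_round messages)

-- ===== LEMMAS AND PROOFS =====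

-- the shared 'flush the current chunk' tail both loops end with
def flushA (r : List (List (List (String × String))) × List (List (String × String))) :
    List (List (List (String × String))) :=
  if r.2 ≠ [] then r.1 ++ [r.2] else r.1

-- recursive restatement of A's loop+flush
def runA (G : List (List (List (String × String)))) (C : List (List (String × String))) :
    List (List (String × String)) → List (List (List (String × String)))
  | [] => if C ≠ [] then G ++ [C] else G
  | m :: ms =>
    if getType m = some "user" ∧ C = [] then runA G (C ++ [m]) ms
    else if getType m = some "assistant" then runA G (C ++ [m]) ms
    else if getType m = some "tool" then runA G (C ++ [m]) ms
    else runA (if C ≠ [] then G ++ [C] else G) (if getType m = some "user" then [m] else []) ms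

-- recursive restatement of B's pass 1
def splitAux (seg : List (List (String × String))) :
    List (List (String × String)) → List (List (List (String × String)))
  | [] => [seg]
  | m :: ms =>
    if getType m = some "user" ∨ getType m = some "assistant" ∨ getType m = some "tool"
    then splitAux (seg ++ [m]) ms else seg :: splitAux [] ms

-- invariant of A's current group: no element after the first is a 'user' message
def InvC (C : List (List (String × String))) : Prop :=
  ∀ m ∈ C.tail, getType m ≠ some "user"

theorem A1 (ms : List (List (String × String))) :
    ∀ G C, flushA (ms.foldl aStep (G, C)) = runA G C ms := by
  induction ms with
  | nil => intro G C; rfl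
  | cons m ms ih =>
    intro G C
    rw [List.foldl_cons, runA]
    by_cases h1 : getType m = some "user" ∧ C = []
    · rw [if_pos h1, show aStep (G, C) m = (G, C ++ [m]) from by simp [aStep, h1]]
      exact ih _ _
    · rw [if_neg h1]
      by_cases h2 : getType m = some "assistant"
      · rw [if_pos h2, show aStep (G, C) m = (G, C ++ [m]) from by simp [aStep, h2]]
        exact ih _ _
      · rw [if_neg h2]
        by_cases h3 : getType m = some "tool"
        · rw [if_pos h3, show aStep (G, C) m = (G, C ++ [m]) from by simp [aStep, h3]]
          exact ih _ _
        · rw [if_neg h3,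
            show aStep (G, C) m = ((if C ≠ [] then G ++ [C] else G),
              if getType m = some "user" then [m] else []) from by
              simp only [aStep]; rw [if_neg h1, if_neg h2, if_neg h3]]
          exact ih _ _

theorem A2 (ms : List (List (String × String))) :
    ∀ G C, runA G C ms = G ++ runA [] C ms := by
  induction ms with
  | nil => intro G C; rw [runA, runA]; split_ifs <;> simp
  | cons m ms ih =>
    intro G C
    rw [runA]
    conv_rhs => rw [runA]
    by_cases h1 : getType m = some "user" ∧ C = []
    · rw [if_pos h1, if_pos h1]; exact ih _ _
    · rw [if_neg h1, if_neg h1]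
      by_cases h2 : getType m = some "assistant"
      · rw [if_pos h2, if_pos h2]; exact ih _ _
      · rw [if_neg h2, if_neg h2]
        by_cases h3 : getType m = some "tool"
        · rw [if_pos h3, if_pos h3]; exact ih _ _
        · rw [if_neg h3, if_neg h3]
          by_cases hc : C ≠ []
          · rw [if_pos hc, if_pos hc, ih (G ++ [C]), ih ([] ++ [C])]; simp
          · rw [if_neg hc, if_neg hc]; exact ih _ _

theorem S1 (ms : List (List (String × String))) :
    ∀ S seg, (ms.foldl bSegStep (S, seg)).1 ++ [(ms.foldl bSegStep (S, seg)).2] =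
      S ++ splitAux seg ms := by
  induction ms with
  | nil => intro S seg; simp [splitAux]
  | cons m ms ih =>
    intro S seg
    rw [List.foldl_cons, splitAux]
    by_cases h : getType m = some "user" ∨ getType m = some "assistant" ∨ getType m = some "tool"
    · rw [if_pos h, show bSegStep (S, seg) m = (S, seg ++ [m]) from by simp [bSegStep, h]]
      exact ih _ _
    · rw [if_neg h, show bSegStep (S, seg) m = (S ++ [seg], []) from by simp [bSegStep, h]]
      rw [ih]; simp

theorem P2' (seg : List (List (String × String))) :
    ∀ out X C, seg.foldl bGroupStep (out ++ X, C) =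
      (out ++ (seg.foldl bGroupStep (X, C)).1, (seg.foldl bGroupStep (X, C)).2) := by
  induction seg with
  | nil => intro out X C; simp
  | cons m seg ih =>
    intro out X C
    rw [List.foldl_cons, List.foldl_cons]
    by_cases h : getType m = some "user" ∧ C ≠ []
    · rw [show bGroupStep (out ++ X, C) m = (out ++ X ++ [C], [m]) from by simp [bGroupStep, h],
        show bGroupStep (X, C) m = (X ++ [C], [m]) from by simp [bGroupStep, h],
        List.append_assoc]
      exact ih _ _ _
    · rw [show bGroupStep (out ++ X, C) m = (out ++ X, C ++ [m]) from by simp [bGroupStep, h],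
        show bGroupStep (X, C) m = (X, C ++ [m]) from by simp [bGroupStep, h]]
      exact ih _ _ _

theorem bGroupSeg_eq (out : List (List (List (String × String)))) (seg : List (List (String × String))) :
    bGroupSeg out seg = flushA (seg.foldl bGroupStep (out, [])) := rfl

theorem P2 (seg : List (List (String × String))) (out : List (List (List (String × String)))) :
    bGroupSeg out seg = out ++ bGroupSeg [] seg := by
  rw [bGroupSeg_eq, bGroupSeg_eq]
  have := P2' seg out [] []
  simp only [List.append_nil] at this
  rw [this]
  unfold flushA
  split_ifs <;> simp

theorem B1 (segs : List (List (List (String × String)))) :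
    ∀ out, segs.foldl bGroupSeg out = out ++ segs.flatMap (bGroupSeg []) := by
  induction segs with
  | nil => intro out; simp
  | cons seg segs ih =>
    intro out
    rw [List.foldl_cons, List.flatMap_cons, P2 seg out, ih]
    simp

theorem IL (C : List (List (String × String))) :
    ∀ out cur, cur ≠ [] → (∀ m ∈ C, getType m ≠ some "user") →
      C.foldl bGroupStep (out, cur) = (out, cur ++ C) := by
  induction C with
  | nil => intro out cur _ _; simp
  | cons c C ih =>
    intro out cur hcur hall
    rw [List.foldl_cons,
      show bGroupStep (out, cur) c = (out, cur ++ [c]) from by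
        simp [bGroupStep, hall c (by simp)]]
    rw [ih out (cur ++ [c]) (by simp) (fun m hm => hall m (by simp [hm]))]
    simp

theorem IL0 (C : List (List (String × String))) (out : List (List (List (String × String))))
    (h : InvC C) : C.foldl bGroupStep (out, []) = (out, C) := by
  cases C with
  | nil => simp
  | cons c C =>
    rw [List.foldl_cons, show bGroupStep (out, []) c = (out, [c]) from by simp [bGroupStep]]
    rw [IL C out [c] (by simp) (fun m hm => h m (by simpa using hm))]
    simp

theorem GC (C : List (List (String × String))) (h : InvC C) :
    bGroupSeg [] C = if C ≠ [] then [C] else [] := by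
  rw [bGroupSeg_eq, IL0 C [] h]
  unfold flushA
  split_ifs <;> simp

theorem SegSplit (C : List (List (String × String))) (m : List (String × String))
    (X : List (List (String × String))) (out : List (List (List (String × String))))
    (hI : InvC C) (hC : C ≠ []) (hm : getType m = some "user") :
    bGroupSeg out (C ++ m :: X) = out ++ [C] ++ bGroupSeg [] (m :: X) := by
  rw [bGroupSeg_eq, bGroupSeg_eq, List.foldl_append, IL0 C out hI,
    List.foldl_cons, List.foldl_cons,
    show bGroupStep (out, C) m = (out ++ [C], [m]) from by simp [bGroupStep, hm, hC],
    show bGroupStep (([] : List (List (List (String × String)))), []) m = ([], [m]) from by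
      simp [bGroupStep]]
  have := P2' X (out ++ [C]) [] [m]
  simp only [List.append_nil] at this
  rw [this]
  unfold flushA
  split_ifs <;> simp

theorem H (ms : List (List (String × String))) (C : List (List (String × String)))
    (m : List (String × String)) (hI : InvC C) (hC : C ≠ []) (hm : getType m = some "user") :
    ∀ X, (splitAux (C ++ m :: X) ms).flatMap (bGroupSeg []) =
      [C] ++ (splitAux (m :: X) ms).flatMap (bGroupSeg []) := by
  induction ms with
  | nil =>
    intro X
    rw [splitAux, splitAux]
    simp only [List.flatMap_cons, List.flatMap_nil, List.append_nil]
    rw [SegSplit C m X [] hI hC hm]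
    simp
  | cons a ms ih =>
    intro X
    rw [splitAux, splitAux]
    by_cases h : getType a = some "user" ∨ getType a = some "assistant" ∨ getType a = some "tool"
    · rw [if_pos h, if_pos h]
      have := ih (X ++ [a])
      simpa [List.append_assoc] using this
    · rw [if_neg h, if_neg h]
      simp only [List.flatMap_cons]
      rw [SegSplit C m X [] hI hC hm]
      simp

theorem InvApp (C : List (List (String × String))) (m : List (String × String))
    (hI : InvC C) (hm : getType m ≠ some "user") : InvC (C ++ [m]) := by
  intro x hx
  cases C with
  | nil => simp at hx
  | cons c C =>
    simp at hx
    rcases hx with hx | hx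
    · exact hI x (by simp [hx])
    · subst hx; exact hm

theorem M (ms : List (List (String × String))) :
    ∀ C, InvC C → runA [] C ms = (splitAux C ms).flatMap (bGroupSeg []) := by
  induction ms with
  | nil =>
    intro C hI
    rw [runA, splitAux]
    simp only [List.flatMap_cons, List.flatMap_nil, List.append_nil, GC C hI]
    split_ifs <;> simp
  | cons m ms ih =>
    intro C hI
    by_cases hu : getType m = some "user"
    · by_cases hc : C = []
      · subst hc
        rw [runA, if_pos ⟨hu, rfl⟩, splitAux, if_pos (Or.inl hu)]
        simpa using ih [m] (by intro x hx; simp at hx)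
      · rw [runA, if_neg (by simp [hc]), if_neg (by simp [hu]), if_neg (by simp [hu]),
          if_pos hc, if_pos hu, A2, splitAux, if_pos (Or.inl hu)]
        rw [show C ++ [m] = C ++ m :: [] from rfl, H ms C m hI hc hu []]
        rw [ih [m] (by intro x hx; simp at hx)]
        simp
    · by_cases hk : getType m = some "assistant" ∨ getType m = some "tool"
      · have step : runA [] C (m :: ms) = runA [] (C ++ [m]) ms := by
          rw [runA]
          rcases hk with h | h <;> simp [h, hu]
        rw [step, splitAux, if_pos (Or.inr hk)]
        exact ih (C ++ [m]) (InvApp C m hI hu)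
      · have hk' : ¬(getType m = some "user" ∨ getType m = some "assistant" ∨ getType m = some "tool") := by
          push_neg at hk ⊢; exact ⟨hu, hk.1, hk.2⟩
        rw [runA, if_neg (by simp [hu]), if_neg (by simp [hu] at hk' ⊢; exact hk'.1),
          if_neg (by simp [hu] at hk' ⊢; exact hk'.2), if_neg hu, A2,
          splitAux, if_neg hk']
        simp only [List.flatMap_cons]
        rw [GC C hI, ih [] (by intro x hx; simp at hx)]
        split_ifs <;> simp

-- ===== VERDICT (by name: the statement is the Claim_ definition above) =====
theorem group_messages_by_api_round_spec : Claim_equal_group_messages_by_api_round := by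
  intro messages _
  show group_messages_by_api_round messages = group_messages_by_api_round_alt messages
  unfold group_messages_by_api_round group_messages_by_api_round_alt
  by_cases hm : messages = []
  · subst hm; rfl
  · rw [if_neg hm]
    show flushA (messages.foldl aStep ([], [])) =
      List.foldl bGroupSeg [] ((messages.foldl bSegStep ([], [])).1 ++
        [(messages.foldl bSegStep ([], [])).2])
    rw [A1, S1, B1]
    simp only [List.nil_append]
    exact M messages [] (by intro x hx; simp at hx)
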